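-- pv_equiv track=rewrite | github.com/lee-yujinn/Algorithm | 프로그래머스/탐색/모의고사.py | solution
-- ===== SOURCE A (Python) =====
-- def solution(answers):
--     student1 = [1,2,3,4,5]
--     student2 = [2,1,2,3,2,4,2,5]
--     student3 = [3,3,1,1,2,2,4,4,5,5]
--
--     answer = []
--     count = [0, 0, 0]
--
--     for i in range(len(answers)):
--         if answers[i] == student1[i%5]: count[0] += 1
--         if answers[i] == student2[i%8]: count[1] += 1
--         if answers[i] == student3[i%10]: count[2] += 1
--
--     for i in range(len(count)):
--         if count[i] == max(count):
--             answer.append(i+1)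
--
--     return answer
-- ===== SOURCE B (Python) =====
-- def solution(answers):
--     # Frequency-table approach: one pass builds a table keyed by (position mod 40, answer)
--     # (40 = lcm of the three pattern lengths), then each pattern's score is read off the
--     # table arithmetically over the 40 residues -- answers is never rescanned per pattern.
--     freq = {}
--     for i, a in enumerate(answers):
--         key = (i % 40, a)
--         freq[key] = freq.get(key, 0) + 1
--     patterns = [[1, 2, 3, 4, 5],
--                 [2, 1, 2, 3, 2, 4, 2, 5],
--                 [3, 3, 1, 1, 2, 2, 4, 4, 5, 5]]
--     counts = [sum(freq.get((r, p[r % len(p)]), 0) for r in range(40)) for p in patterns]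
--     best = max(counts)
--     return [i + 1 for i, c in enumerate(counts) if c == best]
-- ===== Notes on version B (the rewrite author's own statement) =====
-- stated objective: alternative
-- what changed: Replaces A's per-element three-way comparison loop with a frequency table keyed by (index mod 40, answer) built in one pass, from which each pattern's score is read off arithmetically over the 40 residues without rescanning the answers.
import Mathlib
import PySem

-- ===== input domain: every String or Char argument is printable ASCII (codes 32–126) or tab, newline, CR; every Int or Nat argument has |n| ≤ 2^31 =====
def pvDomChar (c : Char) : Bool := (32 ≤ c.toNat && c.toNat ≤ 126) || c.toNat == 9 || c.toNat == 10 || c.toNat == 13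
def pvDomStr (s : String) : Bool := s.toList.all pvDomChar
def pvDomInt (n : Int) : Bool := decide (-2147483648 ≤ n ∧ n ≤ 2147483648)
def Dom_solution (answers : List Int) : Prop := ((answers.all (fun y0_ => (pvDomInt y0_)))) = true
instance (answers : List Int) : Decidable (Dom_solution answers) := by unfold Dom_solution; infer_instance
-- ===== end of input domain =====

-- B replaces A's per-element three-way comparison loop with a frequency table keyed by
-- (index mod 40, answer value) built in one pass; each pattern's score is then read off
-- the table over the 40 residues, never rescanning the answers (objective: alternative).

-- ===== PORT A =====
-- literal port of A: one loop over range(len(answers)) updating count = [c0,c1,c2]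
-- (answers[i] is in range since 0 ≤ i < len(answers), so pyGetD's default 0 is never used;
-- max(count) is on the nonempty 3-list count, so Python's max never raises)
def solution (answers : List Int) : List Int :=
  let student1 : List Int := [1,2,3,4,5]
  let student2 : List Int := [2,1,2,3,2,4,2,5]
  let student3 : List Int := [3,3,1,1,2,2,4,4,5,5]
  let count : List Int :=
    (PySem.List.pyRange 0 answers.length 1).foldl
      (fun (count : List Int) i =>
        let count := if PySem.List.pyGetD answers i 0 = PySem.List.pyGetD student1 (PySem.Int.mod i 5) 0
                     then count.set 0 (PySem.List.pyGetD count 0 0 + 1) else count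
        let count := if PySem.List.pyGetD answers i 0 = PySem.List.pyGetD student2 (PySem.Int.mod i 8) 0
                     then count.set 1 (PySem.List.pyGetD count 1 0 + 1) else count
        let count := if PySem.List.pyGetD answers i 0 = PySem.List.pyGetD student3 (PySem.Int.mod i 10) 0
                     then count.set 2 (PySem.List.pyGetD count 2 0 + 1) else count
        count)
      [0, 0, 0]
  (PySem.List.pyRange 0 count.length 1).foldl
    (fun answer i =>
      if PySem.List.pyGetD count i 0 = (PySem.List.max? count (fun y => y)).getD 0
      then answer ++ [i + 1] else answer)
    []

-- ===== PORT B =====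
-- port of Source B: freq[key] = freq.get(key, 0) + 1 over enumerate(answers), key = (i % 40, a)
def freqB (answers : List Int) : PySem.Dict (Int × Int) Int :=
  (PySem.List.enumerate answers 0).foldl
    (fun d p => d.insert (PySem.Int.mod p.1 40, p.2)
                         (d.getD (PySem.Int.mod p.1 40, p.2) 0 + 1))
    PySem.Dict.empty

-- port of Source B's sum(freq.get((r, p[r % len(p)]), 0) for r in range(40))
-- (p[r % len] is in range since len(p) > 0 at every call, so pyGetD's default 0 is never used)
def scoreB (freq : PySem.Dict (Int × Int) Int) (pattern : List Int) : Int :=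
  (PySem.List.pyRange 0 40 1).foldl
    (fun s r => s + freq.getD (r, PySem.List.pyGetD pattern (PySem.Int.mod r pattern.length) 0) 0)
    0

def solution_alt (answers : List Int) : List Int :=
  let freq := freqB answers
  let counts : List Int :=
    [scoreB freq [1,2,3,4,5],
     scoreB freq [2,1,2,3,2,4,2,5],
     scoreB freq [3,3,1,1,2,2,4,4,5,5]]
  let best := (PySem.List.max? counts (fun y => y)).getD 0
  (PySem.List.enumerate counts 0).foldl
    (fun acc p => if p.2 = best then acc ++ [p.1 + 1] else acc)
    []

-- ===== PRECONDITION & SPEC =====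
def Spec_solution (answers : List Int) (out : List Int) : Prop := out = solution_alt answers
instance (answers : List Int) (out : List Int) : Decidable (Spec_solution answers out) := by unfold Spec_solution; infer_instance

-- ===== CLAIM (what is proved, stated in full; the proofs are below) =====
def Claim_equal_solution : Prop := ∀ (answers : List Int), Dom_solution answers → Spec_solution answers (solution answers)

-- ===== LEMMAS AND PROOFS =====

-- number of matches of a cyclic pattern against an (index, value) list (proof-side spec)
def cnt (pattern : List Int) (m : Int) (l : List (Int × Int)) (t : Int) : Int :=
  l.foldl (fun s p => if p.2 = PySem.List.pyGetD pattern (PySem.Int.mod p.1 m) 0 then s + 1 else s) t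

lemma cnt_shift (pattern : List Int) (m : Int) (l : List (Int × Int)) (t : Int) :
    cnt pattern m l t = t + cnt pattern m l 0 := by
  induction l generalizing t with
  | nil => simp [cnt]
  | cons p l ih =>
    simp only [cnt, List.foldl_cons] at *
    have h := ih
    split_ifs
    · rw [h (t + 1), h (0 + 1)]; ring
    · rw [h t]

lemma pyGetD_one_cons {α : Type} (a b : α) (l : List α) (d : α) :
    PySem.List.pyGetD (a :: b :: l) 1 d = b := by
  simp [PySem.List.pyGetD, PySem.List.pyGet?, PySem.List.pyIdx?]

lemma pyGetD_two_cons {α : Type} (a b c : α) (l : List α) (d : α) :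
    PySem.List.pyGetD (a :: b :: c :: l) 2 d = c := by
  have h : (2:Int) ≤ (l.length:Int) + 1 + 1 := by omega
  simp [PySem.List.pyGetD, PySem.List.pyGet?, PySem.List.pyIdx?, h]

lemma cnt_cons (pattern : List Int) (m : Int) (p : Int × Int) (l : List (Int × Int)) (t : Int) :
    cnt pattern m (p :: l) t
    = t + ((if p.2 = PySem.List.pyGetD pattern (PySem.Int.mod p.1 m) 0 then 1 else 0)
        + cnt pattern m l 0) := by
  simp only [cnt, List.foldl_cons]
  have h := cnt_shift pattern m l
  simp only [cnt] at h
  split_ifs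
  · rw [h (t + 1)]; ring
  · rw [h t]; ring

-- the interleaved fold of A over any index/value pair list equals three independent counts
lemma main_fold (l : List (Int × Int)) (c0 c1 c2 : Int) :
    l.foldl
      (fun (count : List Int) p =>
        let count := if p.2 = PySem.List.pyGetD [1,2,3,4,5] (PySem.Int.mod p.1 5) 0
                     then count.set 0 (PySem.List.pyGetD count 0 0 + 1) else count
        let count := if p.2 = PySem.List.pyGetD [2,1,2,3,2,4,2,5] (PySem.Int.mod p.1 8) 0
                     then count.set 1 (PySem.List.pyGetD count 1 0 + 1) else count
        let count := if p.2 = PySem.List.pyGetD [3,3,1,1,2,2,4,4,5,5] (PySem.Int.mod p.1 10) 0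
                     then count.set 2 (PySem.List.pyGetD count 2 0 + 1) else count
        count)
      [c0, c1, c2]
    = [c0 + cnt [1,2,3,4,5] 5 l 0,
       c1 + cnt [2,1,2,3,2,4,2,5] 8 l 0,
       c2 + cnt [3,3,1,1,2,2,4,4,5,5] 10 l 0] := by
  induction l generalizing c0 c1 c2 with
  | nil => simp [cnt]
  | cons p l ih =>
    simp only [List.foldl_cons, cnt_cons]
    split_ifs <;>
      simp only [List.set, PySem.List.pyGetD_zero_cons, pyGetD_one_cons, pyGetD_two_cons, ih,
                 List.cons.injEq, and_true] <;>
      and_intros <;> ring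

-- B's key function: the residue table key of an (index, value) pair
def keyf (p : Int × Int) : Int × Int := (PySem.Int.mod p.1 40, p.2)

-- exactly one residue r ∈ [a, b) can hit the key (m, v); its term is the match indicator
lemma sum_one_hot (f : Int → Int) (m v a b : Int) (ham : a ≤ m) (hmb : m < b) :
    ((PySem.List.pyRange a b 1).map
        (fun r => if (m, v) = (r, f r) then (1:Int) else 0)).sum
    = if v = f m then 1 else 0 := by
  rw [PySem.List.pyRange_one_append a m b ham (by omega),
      PySem.List.pyRange_one_cons hmb]
  simp only [List.map_append, List.map_cons, List.sum_append, List.sum_cons]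
  have hleft : ((PySem.List.pyRange a m 1).map
      (fun r => if (m, v) = (r, f r) then (1:Int) else 0)).sum = 0 := by
    apply List.sum_eq_zero
    intro x hx
    simp only [List.mem_map] at hx
    obtain ⟨r, hr, hx⟩ := hx
    rw [PySem.List.mem_pyRange_one] at hr
    have : (m, v) ≠ (r, f r) := by
      intro h; exact absurd (congrArg Prod.fst h) (by simp; omega)
    simp [this] at hx; omega
  have hright : ((PySem.List.pyRange (m+1) b 1).map
      (fun r => if (m, v) = (r, f r) then (1:Int) else 0)).sum = 0 := by
    apply List.sum_eq_zero
    intro x hx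
    simp only [List.mem_map] at hx
    obtain ⟨r, hr, hx⟩ := hx
    rw [PySem.List.mem_pyRange_one] at hr
    have : (m, v) ≠ (r, f r) := by
      intro h; exact absurd (congrArg Prod.fst h) (by simp; omega)
    simp [this] at hx; omega
  rw [hleft, hright]
  by_cases h : v = f m <;> simp [Prod.ext_iff, h]

-- summing the residue table's counts over the 40 residues recovers the match count
lemma count_sum (pattern : List Int) (L : Int) (hL : 0 < L) (hdvd : L ∣ 40)
    (l : List (Int × Int)) :
    ((PySem.List.pyRange 0 40 1).map
        (fun r => ((l.map keyf).count
            (r, PySem.List.pyGetD pattern (PySem.Int.mod r L) 0) : Int))).sum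
    = cnt pattern L l 0 := by
  induction l with
  | nil => simp [cnt]
  | cons p l ih =>
    rw [cnt_cons]
    simp only [List.map_cons, List.count_cons, beq_iff_eq]
    -- split the sum into the old table part and the one-hot indicator part
    have hsplit : ((PySem.List.pyRange 0 40 1).map
        (fun r => (((l.map keyf).count (r, PySem.List.pyGetD pattern (PySem.Int.mod r L) 0)
          + if (keyf p) = (r, PySem.List.pyGetD pattern (PySem.Int.mod r L) 0) then 1 else 0 : Nat) : Int))).sum
        = ((PySem.List.pyRange 0 40 1).map
            (fun r => ((l.map keyf).count (r, PySem.List.pyGetD pattern (PySem.Int.mod r L) 0) : Int))).sum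
          + ((PySem.List.pyRange 0 40 1).map
            (fun r => if (PySem.Int.mod p.1 40, p.2) = (r, PySem.List.pyGetD pattern (PySem.Int.mod r L) 0) then (1:Int) else 0)).sum := by
      rw [← List.sum_map_add]
      apply congrArg
      apply List.map_congr_left
      intro r _
      simp only [keyf]
      split_ifs <;> push_cast <;> ring
    rw [hsplit, ih]
    have hhot := sum_one_hot (fun r => PySem.List.pyGetD pattern (PySem.Int.mod r L) 0)
      (PySem.Int.mod p.1 40) p.2 0 40
      (PySem.Int.mod_nonneg p.1 (by norm_num)) (PySem.Int.mod_lt p.1 (by norm_num))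
    simp only at hhot
    have hmm : PySem.Int.mod (PySem.Int.mod p.1 40) L = PySem.Int.mod p.1 L := by
      rw [PySem.Int.mod_eq_emod_of_pos (by norm_num : (0:Int) < 40),
          PySem.Int.mod_eq_emod_of_pos hL, PySem.Int.mod_eq_emod_of_pos hL]
      exact Int.emod_emod_of_dvd p.1 hdvd
    simp only [hmm] at hhot
    linarith [hhot]

-- B's table lookup is a count over the keyed pair list
lemma freqB_getD (answers : List Int) (k : Int × Int) :
    (freqB answers).getD k 0 = (((PySem.List.enumerate answers 0).map keyf).count k : Int) := by
  have h : freqB answers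
      = (((PySem.List.enumerate answers 0).map keyf).foldl
          (fun d x => d.insert x (d.getD x 0 + 1)) PySem.Dict.empty) := by
    unfold freqB; rw [List.foldl_map]; rfl
  rw [h]
  rw [PySem.Dict.getD_foldl_insert_add_one]
  simp [PySem.Dict.getD_empty]

-- B's residue-sum score equals the match count
lemma scoreB_eq (answers pattern : List Int) (L : Int) (hlen : (pattern.length : Int) = L)
    (hL : 0 < L) (hdvd : L ∣ 40) :
    scoreB (freqB answers) pattern = cnt pattern L (PySem.List.enumerate answers 0) 0 := by
  unfold scoreB
  rw [PySem.List.foldl_add]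
  simp only [freqB_getD, hlen, zero_add]
  exact count_sum pattern L hL hdvd _

-- the final max/collect pass: both loops over the 3-element count list produce the same list
lemma phase2 (x1 x2 x3 : Int) :
    (PySem.List.pyRange 0 3 1).foldl
      (fun answer i =>
        if PySem.List.pyGetD [x1,x2,x3] i 0 = (PySem.List.max? [x1,x2,x3] (fun y => y)).getD 0
        then answer ++ [i + 1] else answer) []
    = (PySem.List.enumerate [x1,x2,x3] 0).foldl
      (fun acc p =>
        if p.2 = (PySem.List.max? [x1,x2,x3] (fun y => y)).getD 0
        then acc ++ [p.1 + 1] else acc) [] := by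
  rw [show PySem.List.pyRange 0 3 1 = ([0,1,2] : List Int) from by decide]
  simp only [PySem.List.enumerate_cons, PySem.List.enumerate_nil, List.foldl_cons, List.foldl_nil,
             PySem.List.pyGetD_zero_cons, pyGetD_one_cons, pyGetD_two_cons]
  norm_num

-- ===== VERDICT (by name: the statement is the Claim_ definition above) =====
theorem solution_spec : Claim_equal_solution := by
  intro answers _
  show solution answers = solution_alt answers
  unfold solution solution_alt
  have hA : (PySem.List.pyRange 0 (answers.length:Int) 1).foldl
      (fun (count : List Int) i =>
        let count := if PySem.List.pyGetD answers i 0 = PySem.List.pyGetD [1,2,3,4,5] (PySem.Int.mod i 5) 0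
                     then count.set 0 (PySem.List.pyGetD count 0 0 + 1) else count
        let count := if PySem.List.pyGetD answers i 0 = PySem.List.pyGetD [2,1,2,3,2,4,2,5] (PySem.Int.mod i 8) 0
                     then count.set 1 (PySem.List.pyGetD count 1 0 + 1) else count
        let count := if PySem.List.pyGetD answers i 0 = PySem.List.pyGetD [3,3,1,1,2,2,4,4,5,5] (PySem.Int.mod i 10) 0
                     then count.set 2 (PySem.List.pyGetD count 2 0 + 1) else count
        count)
      [0, 0, 0]
      = (PySem.List.enumerate answers 0).foldl
      (fun (count : List Int) p =>
        let count := if p.2 = PySem.List.pyGetD [1,2,3,4,5] (PySem.Int.mod p.1 5) 0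
                     then count.set 0 (PySem.List.pyGetD count 0 0 + 1) else count
        let count := if p.2 = PySem.List.pyGetD [2,1,2,3,2,4,2,5] (PySem.Int.mod p.1 8) 0
                     then count.set 1 (PySem.List.pyGetD count 1 0 + 1) else count
        let count := if p.2 = PySem.List.pyGetD [3,3,1,1,2,2,4,4,5,5] (PySem.Int.mod p.1 10) 0
                     then count.set 2 (PySem.List.pyGetD count 2 0 + 1) else count
        count)
      [0, 0, 0] := by
    rw [PySem.List.enumerate_eq_map_pyRange (d := 0), List.foldl_map]
    rfl
  dsimp only
  rw [hA, main_fold]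
  simp only [zero_add]
  rw [scoreB_eq answers [1,2,3,4,5] 5 (by norm_num) (by norm_num) (by norm_num),
      scoreB_eq answers [2,1,2,3,2,4,2,5] 8 (by norm_num) (by norm_num) (by norm_num),
      scoreB_eq answers [3,3,1,1,2,2,4,4,5,5] 10 (by norm_num) (by norm_num) (by norm_num)]
  simp only [List.length_cons, List.length_nil]
  exact phase2 _ _ _
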